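-- pv_equiv track=rewrite | github.com/Jorisvansteenbrugge/advbioinf | rosalind/prob12/script.py | calculatePossibility
-- ===== SOURCE A (Python) =====
-- def calculatePossibility(seq):
-- 	possibilities = 1 # we ignore atg
-- 	chanceTable = {"F":2, "L":6, "I":3, "M":1, "V":4, "S":6, "P":4, "T":4, "A":4, "Y":2,
-- 			"*":3, "H":2, "Q":2, "N":2, "K":2, "D":2, "E":2, "C":2, "W":1, "R":6,
-- 			"G":4}
-- 	for aa in seq:
-- 		possibilities *= chanceTable[aa]
-- 	return possibilities
-- ===== SOURCE B (Python) =====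
-- def calculatePossibility(seq):
-- 	# Group the codon table by its value (codon multiplicity) and count each group
-- 	# in the sequence, then combine with one closed-form exponentiation.
-- 	n2 = sum(seq.count(c) for c in "FYHQNKDEC")
-- 	n3 = seq.count("I") + seq.count("*")
-- 	n4 = sum(seq.count(c) for c in "VPTAG")
-- 	n6 = sum(seq.count(c) for c in "LSR")
-- 	return 2 ** n2 * 3 ** n3 * 4 ** n4 * 6 ** n6
-- ===== Notes on version B (the rewrite author's own statement) =====
-- stated objective: alternative
-- what changed: B drops the per-character dict multiply entirely: it counts occurrences of each value class of the codon table (2, 3, 4, 6) with staged str.count passes and returns the closed form 2**n2 * 3**n3 * 4**n4 * 6**n6 (M and W contribute factor 1).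
import Mathlib
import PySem

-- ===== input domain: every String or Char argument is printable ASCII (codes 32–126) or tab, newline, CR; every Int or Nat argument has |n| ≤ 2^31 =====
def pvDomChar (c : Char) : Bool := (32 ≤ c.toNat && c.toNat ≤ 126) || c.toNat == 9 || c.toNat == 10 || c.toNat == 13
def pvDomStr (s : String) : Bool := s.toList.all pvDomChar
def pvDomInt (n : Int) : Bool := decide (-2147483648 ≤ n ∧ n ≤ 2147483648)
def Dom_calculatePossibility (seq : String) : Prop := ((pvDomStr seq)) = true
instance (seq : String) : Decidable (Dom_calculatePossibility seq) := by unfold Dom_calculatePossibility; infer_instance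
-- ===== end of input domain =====

-- B drops the per-character dict multiply: it counts each value class of the codon table
-- and returns the closed form 2^n2 * 3^n3 * 4^n4 * 6^n6 (alternative decomposition; same cost class).

-- ===== PORT A =====
-- Python dict with one-character string keys, ported with Char keys (seq iteration yields chars).
def chanceTableA : PySem.Dict Char Int :=
  PySem.Dict.ofList [('F', 2), ('L', 6), ('I', 3), ('M', 1), ('V', 4), ('S', 6), ('P', 4),
    ('T', 4), ('A', 4), ('Y', 2), ('*', 3), ('H', 2), ('Q', 2), ('N', 2), ('K', 2),
    ('D', 2), ('E', 2), ('C', 2), ('W', 1), ('R', 6), ('G', 4)]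

-- chanceTable[aa] raises KeyError for a missing key; Pre_ excludes exactly those inputs,
-- so the total lookup getD _ 0 is exact on Pre_.
def calculatePossibility (seq : String) : Int :=
  seq.toList.foldl (fun possibilities aa => possibilities * chanceTableA.getD aa 0) 1

-- ===== PORT B =====
-- sum(seq.count(c) for c in "…") is a sum of per-character counts; '**' with Nat counts is '^'.
def calculatePossibility_alt (seq : String) : Int :=
  let n2 := ("FYHQNKDEC".toList.map (fun c => seq.toList.count c)).sum
  let n3 := seq.toList.count 'I' + seq.toList.count '*'
  let n4 := ("VPTAG".toList.map (fun c => seq.toList.count c)).sum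
  let n6 := ("LSR".toList.map (fun c => seq.toList.count c)).sum
  (2 : Int) ^ n2 * 3 ^ n3 * 4 ^ n4 * 6 ^ n6

-- ===== PRECONDITION & SPEC =====
-- Pre_ excludes exactly the inputs where Python A raises KeyError: a character outside the codon table.
def Pre_calculatePossibility (seq : String) : Prop :=
  (seq.toList.all (fun c => c ∈ ['F', 'L', 'I', 'M', 'V', 'S', 'P', 'T', 'A', 'Y', '*', 'H',
    'Q', 'N', 'K', 'D', 'E', 'C', 'W', 'R', 'G'])) = true
instance (seq : String) : Decidable (Pre_calculatePossibility seq) := by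
  unfold Pre_calculatePossibility; infer_instance

def pvWitness_calculatePossibility : String := "MSKV*"

def Spec_calculatePossibility (seq : String) (out : Int) : Prop := out = calculatePossibility_alt seq
instance (seq : String) (out : Int) : Decidable (Spec_calculatePossibility seq out) := by unfold Spec_calculatePossibility; infer_instance

-- ===== CLAIM (what is proved, stated in full; the proofs are below) =====
def Claim_equal_calculatePossibility : Prop := ∀ (seq : String), Dom_calculatePossibility seq → Pre_calculatePossibility seq → Spec_calculatePossibility seq (calculatePossibility seq)

-- ===== LEMMAS AND PROOFS =====

-- a multiplying foldl is the product of the mapped list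
theorem pv_foldl_mul_eq_prod_map {α : Type} (l : List α) (g : α → Int) (a : Int) :
    l.foldl (fun acc x => acc * g x) a = a * (l.map g).prod := by
  induction l generalizing a with
  | nil => simp
  | cons x xs ih => simp [List.foldl_cons, ih (a * g x), mul_assoc]

-- key lemma: over table characters, the plain product equals the value-class closed form
theorem pv_classify (cs : List Char)
    (h : ∀ c ∈ cs, c ∈ ['F', 'L', 'I', 'M', 'V', 'S', 'P', 'T', 'A', 'Y', '*', 'H',
      'Q', 'N', 'K', 'D', 'E', 'C', 'W', 'R', 'G']) :
    (cs.map (fun aa => chanceTableA.getD aa 0)).prod =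
      (2 : Int) ^ (cs.count 'F' + (cs.count 'Y' + (cs.count 'H' + (cs.count 'Q' +
          (cs.count 'N' + (cs.count 'K' + (cs.count 'D' + (cs.count 'E' + cs.count 'C'))))))))
        * 3 ^ (cs.count 'I' + cs.count '*')
        * 4 ^ (cs.count 'V' + (cs.count 'P' + (cs.count 'T' + (cs.count 'A' + cs.count 'G'))))
        * 6 ^ (cs.count 'L' + (cs.count 'S' + cs.count 'R')) := by
  induction cs with
  | nil => simp
  | cons a cs ih =>
    have ha := h a (by simp)
    have ihr := ih (fun c hc => h c (List.mem_cons_of_mem _ hc))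
    simp only [List.map_cons, List.prod_cons, ihr]
    fin_cases ha <;>
      · simp [List.count_cons, chanceTableA, PySem.Dict.ofList, PySem.Dict.update,
          PySem.Dict.getD_insert]
        try ring

-- ===== VERDICT (by name: the statement is the Claim_ definition above) =====
theorem calculatePossibility_spec : Claim_equal_calculatePossibility := by
  unfold Claim_equal_calculatePossibility
  intro seq _ hpre
  unfold Spec_calculatePossibility calculatePossibility calculatePossibility_alt
  rw [pv_foldl_mul_eq_prod_map, one_mul]
  have h : ∀ c ∈ seq.toList, c ∈ ['F', 'L', 'I', 'M', 'V', 'S', 'P', 'T', 'A', 'Y', '*', 'H',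
      'Q', 'N', 'K', 'D', 'E', 'C', 'W', 'R', 'G'] := by
    intro c hc
    have := List.all_eq_true.mp hpre c hc
    simpa using this
  rw [pv_classify seq.toList h]
  simp [List.map, List.sum_cons]
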